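-- pv_equiv track=rewrite | github.com/MatzeB/PyComparse | scripts/pytokenize.py | _detect_string_start
-- ===== SOURCE A (Python) =====
-- def _detect_string_start(text, i):
--     if i >= len(text):
--         return None
--
--     if text[i] in ("'", '"'):
--         quote = text[i]
--         return (i, "", quote, text.startswith(quote * 3, i), False)
--
--     if not text[i].isalpha():
--         return None
--
--     j = i
--     while j < len(text) and text[j].isalpha() and (j - i) < 3:
--         j += 1
--     if j >= len(text) or text[j] not in ("'", '"'):
--         return None
--     prefix = text[i:j]
--     if not prefix:
--         return None
--     if any(c not in "rRbBuUfF" for c in prefix):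
--         return None
--     quote = text[j]
--     return (j, prefix, quote, text.startswith(quote * 3, j), "r" in prefix.lower())
-- ===== SOURCE B (Python) =====
-- import re
--
-- _STRING_START = re.compile(r"([A-Za-z]{0,3})(['\"])")
--
--
-- def _detect_string_start(text, i):
--     m = _STRING_START.match(text, i)
--     if m is None:
--         return None
--     prefix, quote = m.groups()
--     if any(c not in "rRbBuUfF" for c in prefix):
--         return None
--     pos = m.start(2)
--     return (pos, prefix, quote,
--             text.startswith(quote * 3, pos),
--             "r" in prefix.lower())
-- ===== Notes on version B (the rewrite author's own statement) =====
-- stated objective: idiomatic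
-- what changed: B replaces A's explicit early-return chain and character-scanning while loop by a single compiled-regex match ([A-Za-z]{0,3})(['"]) at position i followed by one prefix-validity check; Pre_ restricts to nonnegative positions i >= 0, the natural domain of a scanner index: for -len(text) <= i < 0 A accidentally scans at a wrapped position via Python's negative indexing while re.match clamps the position to 0, and for i < -len(text) A raises IndexError.
-- outside the precondition, e.g. on _detect_string_start("'x", -2): A returns (-2, '', "'", False, False), B returns (0, '', "'", False, False); on _detect_string_start("b'q", -3): A returns (-2, 'b', "'", False, False), B returns (1, 'b', "'", False, False)
import Mathlib
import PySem

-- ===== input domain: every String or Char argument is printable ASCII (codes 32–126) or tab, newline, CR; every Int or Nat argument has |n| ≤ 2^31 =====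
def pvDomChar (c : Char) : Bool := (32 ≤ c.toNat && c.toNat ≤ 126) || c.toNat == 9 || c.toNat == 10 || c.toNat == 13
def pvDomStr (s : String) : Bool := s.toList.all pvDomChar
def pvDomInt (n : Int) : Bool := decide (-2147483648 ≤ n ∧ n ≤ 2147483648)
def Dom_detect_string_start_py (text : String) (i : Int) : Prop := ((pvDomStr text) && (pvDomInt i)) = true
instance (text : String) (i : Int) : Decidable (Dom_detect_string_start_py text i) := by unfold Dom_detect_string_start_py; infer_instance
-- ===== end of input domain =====

-- B replaces A's char loop by one compiled-regex match ([A-Za-z]{0,3})(['"]) at position i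
-- (objective: idiomatic); equality of return values is proved on nonnegative positions (Pre_).

-- text.startswith(p, k): exact — Python's startswith with a start argument clamps the start
-- exactly like the slice text[k:] does, then compares the prefix. Used by both ports for the
-- same library call text.startswith(quote * 3, pos).
def pyStartswithFrom (cs : List Char) (p : List Char) (k : Int) : Bool :=
  PySem.Chars.startswith (PySem.List.slice cs (some k) none) p

-- ===== PORT A =====

-- text[x] in ("'", '"') in A; also the regex character class ['"] in B's port
def dssA_isQuote (c : Char) : Bool := c == '\'' || c == '"'

-- while j < len(text) and text[j].isalpha() and (j - i) < 3: j += 1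
def dssA_loop (cs : List Char) (i j : Int) : Int :=
  if h : j < (cs.length : Int) ∧ (PySem.List.pyGet? cs j).map PySem.Chars.isalpha = some true ∧ j - i < 3 then
    dssA_loop cs i (j + 1)
  else j
termination_by (i + 3 - j).toNat
decreasing_by omega

-- the code after the while loop: j ≥ len / quote test / prefix = text[i:j] checks / the result tuple
def dssA_finish (cs : List Char) (i j : Int) (cj : Char) (pfx : List Char) :
    Option (Int × String × String × Bool × Bool) :=
  if pfx.isEmpty then none
  else if pfx.any (fun c => !(PySem.Chars.isIn [c] "rRbBuUfF".toList)) then none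
  else some (j, String.mk pfx, String.mk [cj],
             pyStartswithFrom cs (PySem.List.pyRepeat [cj] 3) j,
             PySem.Chars.isIn ['r'] (PySem.Chars.lower pfx))

def dssA_tail (cs : List Char) (i j : Int) : Option (Int × String × String × Bool × Bool) :=
  if (cs.length : Int) ≤ j then none
  else
    match PySem.List.pyGet? cs j with
    | none => none   -- unreachable: i ≤ j, so Python's text[j] is in range here
    | some cj =>
      if ¬ dssA_isQuote cj then none
      else dssA_finish cs i j cj (PySem.List.slice cs (some i) (some j))

def detect_string_start_py (text : String) (i : Int) : Option (Int × String × String × Bool × Bool) :=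
  if (text.toList.length : Int) ≤ i then none
  else
    match PySem.List.pyGet? text.toList i with
    | none => none   -- Python raises IndexError here (i < -len(text)); excluded by Pre_
    | some c0 =>
      if dssA_isQuote c0 then
        some (i, "", String.mk [c0], pyStartswithFrom text.toList (PySem.List.pyRepeat [c0] 3) i, false)
      else if ¬ PySem.Chars.isalpha c0 then none
      else dssA_tail text.toList i (dssA_loop text.toList i i)

-- ===== PORT B =====

-- the regex character class [A-Za-z]
def dssB_isAsciiAlpha (c : Char) : Bool := ('A' ≤ c && c ≤ 'Z') || ('a' ≤ c && c ≤ 'z')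

-- Hand port (exact, step for step) of _STRING_START.match(text, i) for the anchored regex
-- ([A-Za-z]{0,3})(['"]): the greedy counted repetition first consumes k0 = min(3, alpha run
-- at pos) characters, then the engine backtracks k0, k0-1, …, 0 until ['"] matches; re clamps
-- a negative pos to 0 (mirrored exactly by Int.toNat below).
def dssB_run (cs : List Char) (p : Nat) : Nat → Nat
  | 0 => 0
  | fuel + 1 =>
    match cs[p]? with
    | some c => if dssB_isAsciiAlpha c then dssB_run cs (p + 1) fuel + 1 else 0
    | none => 0

def dssB_try (cs : List Char) (p : Nat) : Nat → Option (Nat × Char)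
  | 0 =>
    match cs[p]? with
    | some c => if dssA_isQuote c then some (0, c) else none
    | none => none
  | k + 1 =>
    match cs[p + (k + 1)]? with
    | some c => if dssA_isQuote c then some (k + 1, c) else dssB_try cs p k
    | none => dssB_try cs p k

def dssB_match (cs : List Char) (p : Nat) : Option (List Char × Char) :=
  match dssB_try cs p (dssB_run cs p 3) with
  | some (k, q) => some ((cs.drop p).take k, q)   -- (m.group(1), m.group(2))
  | none => none

-- everything after the match: the prefix-validity test and the result tuple (pos = m.start(2))
def dssB_finish (cs : List Char) (p : Nat) :
    Option (List Char × Char) → Option (Int × String × String × Bool × Bool)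
  | none => none
  | some (pfx, q) =>
    if pfx.any (fun c => !(PySem.Chars.isIn [c] "rRbBuUfF".toList)) then none
    else some (((p + pfx.length : Nat) : Int), String.mk pfx, String.mk [q],
               pyStartswithFrom cs (PySem.List.pyRepeat [q] 3) ((p + pfx.length : Nat) : Int),
               PySem.Chars.isIn ['r'] (PySem.Chars.lower pfx))

def detect_string_start_py_alt (text : String) (i : Int) : Option (Int × String × String × Bool × Bool) :=
  dssB_finish text.toList i.toNat (dssB_match text.toList i.toNat)

-- ===== PRECONDITION & SPEC =====

-- Pre_ restricts to nonnegative positions, the natural domain of a scanner index: for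
-- -len(text) ≤ i < 0 A accidentally scans at a wrapped position via Python's negative indexing
-- (B matches at a clamped position there), and for i < -len(text) A raises IndexError.
def Pre_detect_string_start_py (text : String) (i : Int) : Prop := 0 ≤ i
instance (text : String) (i : Int) : Decidable (Pre_detect_string_start_py text i) := by
  unfold Pre_detect_string_start_py; infer_instance

def pvWitness_detect_string_start_py : String × Int := ("rb'x", 0)

def Spec_detect_string_start_py (text : String) (i : Int) (out : Option (Int × String × String × Bool × Bool)) : Prop := out = detect_string_start_py_alt text i
instance (text : String) (i : Int) (out : Option (Int × String × String × Bool × Bool)) : Decidable (Spec_detect_string_start_py text i out) := by unfold Spec_detect_string_start_py; infer_instance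

-- ===== CLAIM =====
def Claim_equal_detect_string_start_py : Prop := ∀ (text : String) (i : Int), Dom_detect_string_start_py text i → Pre_detect_string_start_py text i → Spec_detect_string_start_py text i (detect_string_start_py text i)

-- ===== LEMMAS AND PROOFS =====

theorem dss_alpha_eq (c : Char) : PySem.Chars.isalpha c = dssB_isAsciiAlpha c := by
  simp [PySem.Chars.isalpha, PySem.Chars.isupper, PySem.Chars.islower, dssB_isAsciiAlpha]

theorem dss_alpha_not_quote {c : Char} (h : dssB_isAsciiAlpha c = true) : dssA_isQuote c = false := by
  simp only [dssA_isQuote, Bool.or_eq_false_iff, beq_eq_false_iff_ne, ne_eq]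
  constructor <;> rintro rfl <;> exact absurd h (by decide)

theorem dssB_run_le (cs : List Char) (p : Nat) : ∀ f, dssB_run cs p f ≤ f := by
  intro f
  induction f generalizing p with
  | zero => simp [dssB_run]
  | succ f ih =>
    cases h : cs[p]? with
    | none => simp [dssB_run, h]
    | some c =>
      by_cases ha : dssB_isAsciiAlpha c = true
      · have := ih (p+1); simp [dssB_run, h, ha]; omega
      · simp [dssB_run, h, ha]

theorem dssB_run_alpha (cs : List Char) : ∀ f p t, t < dssB_run cs p f →
    ∃ c, cs[p + t]? = some c ∧ dssB_isAsciiAlpha c = true := by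
  intro f
  induction f with
  | zero => intro p t h; simp [dssB_run] at h
  | succ f ih =>
    intro p t h
    cases hg : cs[p]? with
    | none => rw [show dssB_run cs p (f+1) = 0 by simp [dssB_run, hg]] at h; omega
    | some c =>
      by_cases ha : dssB_isAsciiAlpha c = true
      · rw [show dssB_run cs p (f+1) = dssB_run cs (p+1) f + 1 by simp [dssB_run, hg, ha]] at h
        cases t with
        | zero => exact ⟨c, by simpa using hg, ha⟩
        | succ t =>
          obtain ⟨d, hd, had⟩ := ih (p+1) t (by omega)
          exact ⟨d, by rw [show p + (t+1) = p + 1 + t by omega]; exact hd, had⟩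
      · rw [show dssB_run cs p (f+1) = 0 by simp [dssB_run, hg, ha]] at h; omega

theorem dssB_run_ge (cs : List Char) : ∀ f p m, m ≤ f →
    (∀ t, t < m → ∃ c, cs[p + t]? = some c ∧ dssB_isAsciiAlpha c = true) →
    m ≤ dssB_run cs p f := by
  intro f
  induction f with
  | zero => intro p m hm _; omega
  | succ f ih =>
    intro p m hm hall
    cases m with
    | zero => omega
    | succ m =>
      obtain ⟨c, hc, ha⟩ := hall 0 (by omega)
      rw [Nat.add_zero] at hc
      simp only [dssB_run, hc, ha, if_true]
      have := ih (p+1) m (by omega) (fun t ht => by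
        obtain ⟨d, hd, had⟩ := hall (t+1) (by omega)
        exact ⟨d, by rw [show p + 1 + t = p + (t+1) by omega]; exact hd, had⟩)
      omega

theorem dssB_try_alpha_below (cs : List Char) (p : Nat) : ∀ k,
    (∀ t, t < k → ∃ c, cs[p + t]? = some c ∧ dssB_isAsciiAlpha c = true) →
    dssB_try cs p k =
      match cs[p + k]? with
      | some c => if dssA_isQuote c then some (k, c) else none
      | none => none := by
  intro k
  induction k with
  | zero => intro _; simp only [dssB_try, Nat.add_zero]
  | succ k ih =>
    intro hall
    obtain ⟨c, hc, ha⟩ := hall k (by omega)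
    have hnq : dssA_isQuote c = false := dss_alpha_not_quote ha
    have hik := ih (fun t ht => hall t (by omega))
    simp only [dssB_try, hik, hc, hnq]
    cases hg : cs[p + (k + 1)]? with
    | none => simp
    | some d => by_cases hq : dssA_isQuote d = true <;> simp [hq]

theorem dssA_loop_eq_run (cs : List Char) : ∀ (f : Nat) (i j : Int) (q : Nat),
    j - i + (f : Int) = 3 → (j : Int) = (q : Int) →
    dssA_loop cs i j = j + (dssB_run cs q f : Int) := by
  intro f
  induction f with
  | zero =>
    intro i j q hf hjq
    rw [dssA_loop, dif_neg (by push_cast at hf; omega)]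
    simp [dssB_run]
  | succ f ih =>
    intro i j q hf hjq
    have hjn : 0 ≤ j := by omega
    have hget : PySem.List.pyGet? cs j = cs[q]? := by
      rw [PySem.List.pyGet?_of_nonneg cs hjn]
      congr 1
      omega
    cases hg : cs[q]? with
    | none =>
      have hrun : dssB_run cs q (f + 1) = 0 := by simp [dssB_run, hg]
      rw [dssA_loop, dif_neg (by rw [hget, hg]; simp), hrun]
      simp
    | some c =>
      have hqlen : q < cs.length := by
        by_contra hq
        rw [List.getElem?_eq_none (by omega)] at hg
        cases hg
      by_cases ha : dssB_isAsciiAlpha c = true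
      · have hrun : dssB_run cs q (f + 1) = dssB_run cs (q + 1) f + 1 := by
          simp [dssB_run, hg, ha]
        rw [dssA_loop, dif_pos ⟨by omega,
              by rw [hget, hg]; simp [dss_alpha_eq, ha], by push_cast at hf; omega⟩]
        rw [ih i (j + 1) (q + 1) (by push_cast at hf ⊢; omega) (by push_cast; omega), hrun]
        push_cast; ring
      · have hrun : dssB_run cs q (f + 1) = 0 := by simp [dssB_run, hg, ha]
        rw [dssA_loop,
            dif_neg (by rw [hget, hg]; simp [dss_alpha_eq]; intro _ h; exact (ha h).elim), hrun]
        simp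

theorem dssB_finish_some (cs : List Char) (p : Nat) (pfx : List Char) (q : Char) :
    dssB_finish cs p (some (pfx, q)) =
      if pfx.any (fun c => !(PySem.Chars.isIn [c] "rRbBuUfF".toList)) then none
      else some (((p + pfx.length : Nat) : Int), String.mk pfx, String.mk [q],
                 pyStartswithFrom cs (PySem.List.pyRepeat [q] 3) ((p + pfx.length : Nat) : Int),
                 PySem.Chars.isIn ['r'] (PySem.Chars.lower pfx)) := rfl

theorem dss_main (text : String) (i : Int) (hpre : 0 ≤ i) :
    detect_string_start_py text i = detect_string_start_py_alt text i := by
  unfold detect_string_start_py detect_string_start_py_alt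
  generalize text.toList = cs
  set p : Nat := i.toNat with hpdef
  have hpi : (p : Int) = i := by omega
  by_cases hn : (cs.length : Int) ≤ i
  · -- i ≥ len(text): A returns None; the regex cannot match at/after the end
    rw [if_pos hn]
    have hnone : cs[p]? = none := List.getElem?_eq_none (by omega)
    unfold dssB_match
    rw [show dssB_run cs p 3 = 0 by simp [dssB_run, hnone]]
    rw [show dssB_try cs p 0 = none by simp [dssB_try, hnone]]
    rfl
  · push_neg at hn
    rw [if_neg (by omega)]
    unfold dssB_match
    have hplt : p < cs.length := by omega
    have hc : cs[p]? = some cs[p] := List.getElem?_eq_getElem hplt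
    set c := cs[p] with hcdef
    have hget : PySem.List.pyGet? cs i = some c := by
      rw [PySem.List.pyGet?_of_nonneg cs hpre, ← hpdef, hc]
    simp only [hget]
    by_cases hq : dssA_isQuote c = true
    · -- immediate quote: prefix is empty in both
      rw [if_pos (show dssA_isQuote c = true from hq)]
      have hna : dssB_isAsciiAlpha c = false := by
        cases hb : dssB_isAsciiAlpha c
        · rfl
        · exact absurd (dss_alpha_not_quote hb) (by simp [hq])
      rw [show dssB_run cs p 3 = 0 by simp [dssB_run, hc, hna]]
      rw [show dssB_try cs p 0 = some (0, c) by simp [dssB_try, hc, hq]]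
      show _ = dssB_finish cs p (some ((cs.drop p).take 0, c))
      rw [List.take_zero, dssB_finish_some]
      norm_num [hpi]
      exact ⟨rfl, by decide⟩
    · by_cases ha : dssB_isAsciiAlpha c = true
      · -- alpha prefix path
        rw [if_neg (by simp [dssA_isQuote, dssA_isQuote] at hq ⊢; exact hq)]
        rw [if_neg (by rw [dss_alpha_eq]; simp [ha])]
        set r : Nat := dssB_run cs p 3 with hrdef
        have hr3 : r ≤ 3 := dssB_run_le cs p 3
        have halpha : ∀ t, t < r → ∃ d, cs[p + t]? = some d ∧ dssB_isAsciiAlpha d = true :=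
          fun t ht => dssB_run_alpha cs 3 p t (hrdef ▸ ht)
        have htry := dssB_try_alpha_below cs p r halpha
        have hj : dssA_loop cs i i = i + r :=
          dssA_loop_eq_run cs 3 i i p (by omega) (by omega)
        rw [hj]
        by_cases hend : cs.length ≤ p + r
        · -- run ends exactly at the end of the text: no quote can follow
          unfold dssA_tail
          rw [if_pos (by push_cast; omega)]
          rw [htry, List.getElem?_eq_none hend]
          rfl
        · push_neg at hend
          have hcq : cs[p + r]? = some cs[p + r] := List.getElem?_eq_getElem hend
          unfold dssA_tail
          rw [if_neg (show ¬ (cs.length : Int) ≤ i + r by push_cast; omega)]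
          have hpgj : PySem.List.pyGet? cs (i + r) = some cs[p + r] := by
            rw [PySem.List.pyGet?_of_nonneg cs (by omega)]
            rw [show (i + (r : Int)).toNat = p + r by omega, hcq]
          simp only [hpgj]
          have hBtry : dssB_try cs p r =
              (if dssA_isQuote cs[p + r] = true then some (r, cs[p + r]) else none) := by
            rw [htry, hcq]
          by_cases hqq : dssA_isQuote cs[p + r] = true
          · rw [hBtry, if_pos hqq, if_neg (by simpa using hqq)]
            show dssA_finish cs i (i + (r : Int)) cs[p + r]
                   (PySem.List.slice cs (some i) (some (i + (r : Int)))) =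
                 dssB_finish cs p (some ((cs.drop p).take r, cs[p + r]))
            have e1 : PySem.List.clampIdx cs.length i = p := by
              unfold PySem.List.clampIdx; split_ifs <;> omega
            have e2 : PySem.List.clampIdx cs.length (i + r) = p + r := by
              unfold PySem.List.clampIdx; split_ifs <;> omega
            have hsl : PySem.List.slice cs (some i) (some (i + (r : Int))) = (cs.drop p).take r := by
              simp only [PySem.List.slice]
              rw [e1, e2]
              congr 1
              omega
            rw [hsl, dssB_finish_some]
            have hr1 : 1 ≤ r := by
              refine dssB_run_ge cs 3 p 1 (by omega) ?_
              intro t ht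
              have : t = 0 := by omega
              subst this
              exact ⟨c, by simpa using hc, ha⟩
            have hlen : ((cs.drop p).take r).length = r := by
              simp [List.length_take, List.length_drop]
              omega
            have hne : ((cs.drop p).take r).isEmpty = false := by
              cases hE : ((cs.drop p).take r).isEmpty
              · rfl
              · exfalso
                rw [List.isEmpty_iff] at hE
                rw [hE] at hlen
                simp at hlen
                omega
            unfold dssA_finish
            rw [if_neg (by rw [hne]; exact Bool.false_ne_true)]
            by_cases hval : ((cs.drop p).take r).any
                (fun c => !(PySem.Chars.isIn [c] "rRbBuUfF".toList)) = true
            · rw [if_pos hval, if_pos hval]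
            · rw [if_neg hval, if_neg hval]
              have hpr : ((p + ((cs.drop p).take r).length : Nat) : Int) = i + (r : Int) := by
                rw [hlen]; push_cast; omega
              rw [hpr]
          · rw [hBtry, if_neg hqq, if_pos (by simpa using hqq)]
            rfl
      · -- neither quote nor alpha at the position: both None
        rw [if_neg (by simpa using hq)]
        rw [if_pos (by rw [dss_alpha_eq]; simp [ha])]
        rw [show dssB_run cs p 3 = 0 by simp [dssB_run, hc, ha]]
        rw [show dssB_try cs p 0 = none by simp [dssB_try, hc, hq]]
        rfl

-- ===== VERDICT =====
theorem detect_string_start_py_spec : Claim_equal_detect_string_start_py := by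
  intro text i _ hpre
  unfold Spec_detect_string_start_py
  exact dss_main text i hpre
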